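-- pv_equiv track=rewrite | github.com/tbj114/tbj1145141919810 | axaltyx/charting/stem_leaf.py | _calculate_stem_leaf
-- ===== SOURCE A (Python) =====
-- def _calculate_stem_leaf(data):
--     """计算茎叶"""
--     data = sorted(data)
--     stems = []
--     leaves = []
--     current_stem = None
--     current_leaves = []
--
--     for value in data:
--         stem = int(value // 10)
--         leaf = int(value % 10)
--
--         if stem != current_stem:
--             if current_stem is not None:
--                 stems.append(current_stem)
--                 leaves.append(current_leaves)
--             current_stem = stem
--             current_leaves = [leaf]
--         else:
--             current_leaves.append(leaf)
--
--     if current_stem is not None: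
--         stems.append(current_stem)
--         leaves.append(current_leaves)
--
--     return stems, leaves
-- ===== SOURCE B (Python) =====
-- def _calculate_stem_leaf(data):
--     """计算茎叶"""
--     stems = sorted({int(v // 10) for v in data})
--     leaves = [sorted(int(v % 10) for v in data if v // 10 == s) for s in stems]
--     return stems, leaves
-- ===== Notes on version B (the rewrite author's own statement) =====
-- stated objective: alternative
-- what changed: Replaces A's sort-then-single-pass run-detection state machine (current_stem/current_leaves with a boundary branch and trailing flush) by staged passes: compute the sorted set of distinct stems, then for each stem independently collect and sort its leaves with a filter comprehension; the data is never sorted and no running group state exists.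
import Mathlib
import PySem

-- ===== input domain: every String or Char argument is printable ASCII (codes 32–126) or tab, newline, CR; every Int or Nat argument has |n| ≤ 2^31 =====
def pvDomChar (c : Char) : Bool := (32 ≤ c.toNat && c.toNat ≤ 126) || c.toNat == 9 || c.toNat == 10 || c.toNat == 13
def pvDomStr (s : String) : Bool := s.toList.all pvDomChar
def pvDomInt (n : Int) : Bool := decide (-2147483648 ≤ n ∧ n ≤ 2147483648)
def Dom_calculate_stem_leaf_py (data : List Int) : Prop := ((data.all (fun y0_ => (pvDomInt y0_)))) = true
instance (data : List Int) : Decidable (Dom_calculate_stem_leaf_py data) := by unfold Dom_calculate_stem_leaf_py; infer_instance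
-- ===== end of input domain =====

-- B replaces A's sort-then-run-detection state machine by staged passes: the sorted set of
-- distinct stems, then per-stem filtered-and-sorted leaves (objective: alternative).
-- Return value only; neither program mutates its argument.

-- ===== PORT A =====
-- A's for-loop over the sorted data, carrying the state (stems, leaves, current_stem,
-- current_leaves); the [] cases are A's final flush after the loop
def pvLoopA : List Int → List Int → List (List Int) → Option Int → List Int →
    List Int × List (List Int)
  | [], stems, leaves, none, _ => (stems, leaves)
  | [], stems, leaves, some c, curL => (stems ++ [c], leaves ++ [curL])
  | v :: rest, stems, leaves, cur, curL =>
    let stem := PySem.Int.floordiv v 10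
    let leaf := PySem.Int.mod v 10
    match cur with
    | none => pvLoopA rest stems leaves (some stem) [leaf]
    | some c =>
      if stem ≠ c then
        pvLoopA rest (stems ++ [c]) (leaves ++ [curL]) (some stem) [leaf]
      else
        pvLoopA rest stems leaves (some c) (curL ++ [leaf])

def calculate_stem_leaf_py (data : List Int) : List Int × List (List Int) :=
  pvLoopA (PySem.List.sorted data (fun x => x) false) [] [] none []

-- ===== PORT B =====
-- stems = sorted({v // 10 for v in data}); leaves = per-stem filter comprehension, sorted
def calculate_stem_leaf_py_alt (data : List Int) : List Int × List (List Int) :=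
  let stems := PySem.List.sorted
    (PySem.Set.ofList (data.map (fun v => PySem.Int.floordiv v 10))) (fun x => x) false
  (stems, stems.map (fun s =>
    PySem.List.sorted
      ((data.filter (fun v => PySem.Int.floordiv v 10 == s)).map
        (fun v => PySem.Int.mod v 10)) (fun x => x) false))

-- ===== PRECONDITION & SPEC =====
def Spec_calculate_stem_leaf_py (data : List Int) (out : List Int × List (List Int)) : Prop := out = calculate_stem_leaf_py_alt data
instance (data : List Int) (out : List Int × List (List Int)) : Decidable (Spec_calculate_stem_leaf_py data out) := by unfold Spec_calculate_stem_leaf_py; infer_instance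

-- ===== CLAIM (what is proved, stated in full; the proofs are below) =====
def Claim_equal_calculate_stem_leaf_py : Prop := ∀ (data : List Int), Dom_calculate_stem_leaf_py data → Spec_calculate_stem_leaf_py data (calculate_stem_leaf_py data)

-- ===== LEMMAS AND PROOFS =====

-- proof-side names for stem and leaf of a value
def pvF (v : Int) : Int := PySem.Int.floordiv v 10
def pvM (v : Int) : Int := PySem.Int.mod v 10

-- the stems A will emit after the current one, reading the list left to right
def pvStemsOf : List Int → Int → List Int
  | [], _ => []
  | v :: r, c => if pvF v = c then pvStemsOf r c else pvF v :: pvStemsOf r (pvF v)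

-- the leaves A appends to the CURRENT group (the prefix run of stem c)
def pvLeavesOf : List Int → Int → List Int
  | [], _ => []
  | v :: r, c => if pvF v = c then pvM v :: pvLeavesOf r c else []

-- the leaf groups A emits after the current one
def pvGroupsOf : List Int → Int → List (List Int)
  | [], _ => []
  | v :: r, c =>
    if pvF v = c then pvGroupsOf r c
    else (pvM v :: pvLeavesOf r (pvF v)) :: pvGroupsOf r (pvF v)

-- unconditional characterization of A's loop (pure structural induction, no sortedness)
lemma pvLoopA_eq (l : List Int) : ∀ (stems : List Int) (leaves : List (List Int))
    (c : Int) (curL : List Int),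
    pvLoopA l stems leaves (some c) curL =
      (stems ++ c :: pvStemsOf l c,
       leaves ++ (curL ++ pvLeavesOf l c) :: pvGroupsOf l c) := by
  induction l with
  | nil => intro stems leaves c curL; simp [pvLoopA, pvStemsOf, pvLeavesOf, pvGroupsOf]
  | cons v r ih =>
    intro stems leaves c curL
    by_cases h : pvF v = c
    · have : pvLoopA (v :: r) stems leaves (some c) curL =
          pvLoopA r stems leaves (some c) (curL ++ [pvM v]) := by
        simp only [pvLoopA, pvF, pvM] at *
        rw [if_neg (not_not_intro h)]
      rw [this, ih]
      simp [pvStemsOf, pvLeavesOf, pvGroupsOf, h]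
    · have : pvLoopA (v :: r) stems leaves (some c) curL =
          pvLoopA r (stems ++ [c]) (leaves ++ [curL]) (some (pvF v)) [pvM v] := by
        simp only [pvLoopA, pvF, pvM] at *
        rw [if_pos h]
      rw [this, ih]
      simp [pvStemsOf, pvLeavesOf, pvGroupsOf, h]

-- Python's // by 10 is monotone
lemma pvFd_mono {a b : Int} (h : a ≤ b) : pvF a ≤ pvF b := by
  unfold pvF
  rw [PySem.Int.floordiv_eq_ediv_of_pos (by norm_num),
      PySem.Int.floordiv_eq_ediv_of_pos (by norm_num)]
  exact Int.ediv_le_ediv (by norm_num) h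

-- v = 10 * pvF v + pvM v
lemma pvFM (v : Int) : pvF v * 10 + pvM v = v := PySem.Int.floordiv_mul_add_mod v 10

-- membership in pvStemsOf on a sorted tail whose stems are ≥ c
lemma pvMem_stemsOf (l : List Int) : ∀ (c x : Int), l.Pairwise (· ≤ ·) →
    (∀ v ∈ l, c ≤ pvF v) → (x ∈ pvStemsOf l c ↔ x ∈ l.map pvF ∧ c < x) := by
  induction l with
  | nil => intro c x _ _; simp [pvStemsOf]
  | cons v r ih =>
    intro c x hpw hge
    have hhead : ∀ w ∈ r, v ≤ w := fun w hw => (List.pairwise_cons.mp hpw).1 w hw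
    have hcv : c ≤ pvF v := hge v (by simp)
    by_cases h : pvF v = c
    · rw [pvStemsOf, if_pos h,
        ih c x hpw.tail (fun w hw => le_trans hcv (pvFd_mono (hhead w hw)))]
      constructor
      · rintro ⟨hm, hlt⟩; exact ⟨by simp [hm], hlt⟩
      · rintro ⟨hm, hlt⟩
        rcases (by simpa using hm : x = pvF v ∨ x ∈ r.map pvF) with rfl | hm'
        · omega
        · exact ⟨hm', hlt⟩
    · have hclt : c < pvF v := lt_of_le_of_ne hcv (Ne.symm h)
      rw [pvStemsOf, if_neg h]
      have hge' : ∀ w ∈ r, pvF v ≤ pvF w := fun w hw => pvFd_mono (hhead w hw)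
      constructor
      · intro hx
        rcases (by simpa using hx : x = pvF v ∨ x ∈ pvStemsOf r (pvF v)) with rfl | hx'
        · exact ⟨by simp, hclt⟩
        · obtain ⟨hm, hlt⟩ := (ih (pvF v) x hpw.tail hge').mp hx'
          exact ⟨by simp [hm], lt_trans hclt hlt⟩
      · rintro ⟨hm, hlt⟩
        rcases (by simpa using hm : x = pvF v ∨ x ∈ r.map pvF) with rfl | hm'
        · simp
        · obtain ⟨w, hw, rfl⟩ := List.mem_map.mp hm'
          rcases lt_or_eq_of_le (hge' w hw) with hgt | heq
          · exact List.mem_cons_of_mem _ ((ih (pvF v) _ hpw.tail hge').mpr ⟨hm', hgt⟩)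
          · simp [← heq]

-- c :: pvStemsOf l c is strictly increasing on a sorted tail
lemma pvStemsOf_pairwise (l : List Int) : ∀ (c : Int), l.Pairwise (· ≤ ·) →
    (∀ v ∈ l, c ≤ pvF v) → (c :: pvStemsOf l c).Pairwise (· < ·) := by
  induction l with
  | nil => intro c _ _; simp [pvStemsOf]
  | cons v r ih =>
    intro c hpw hge
    have hhead : ∀ w ∈ r, v ≤ w := fun w hw => (List.pairwise_cons.mp hpw).1 w hw
    have hcv : c ≤ pvF v := hge v (by simp)
    by_cases h : pvF v = c
    · rw [pvStemsOf, if_pos h]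
      exact ih c hpw.tail (fun w hw => le_trans hcv (pvFd_mono (hhead w hw)))
    · have hclt : c < pvF v := lt_of_le_of_ne hcv (Ne.symm h)
      have hge' : ∀ w ∈ r, pvF v ≤ pvF w := fun w hw => pvFd_mono (hhead w hw)
      have htail := ih (pvF v) hpw.tail hge'
      rw [pvStemsOf, if_neg h]
      refine List.pairwise_cons.mpr ⟨?_, htail⟩
      intro x hx
      rcases (by simpa using hx : x = pvF v ∨ x ∈ pvStemsOf r (pvF v)) with rfl | hx'
      · exact hclt
      · exact lt_trans hclt ((pvMem_stemsOf r (pvF v) x hpw.tail hge').mp hx').2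
    
-- the prefix-run leaves are exactly the filtered leaves, on a sorted tail
lemma pvLeavesOf_eq (l : List Int) : ∀ (c : Int), l.Pairwise (· ≤ ·) →
    (∀ v ∈ l, c ≤ pvF v) →
    pvLeavesOf l c = (l.filter (fun v => pvF v == c)).map pvM := by
  induction l with
  | nil => intro c _ _; simp [pvLeavesOf]
  | cons v r ih =>
    intro c hpw hge
    have hhead : ∀ w ∈ r, v ≤ w := fun w hw => (List.pairwise_cons.mp hpw).1 w hw
    have hcv : c ≤ pvF v := hge v (by simp)
    by_cases h : pvF v = c
    · rw [pvLeavesOf, if_pos h, List.filter_cons_of_pos (by simpa using h),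
        List.map_cons, ih c hpw.tail (fun w hw => le_trans hcv (pvFd_mono (hhead w hw)))]
    · have hclt : c < pvF v := lt_of_le_of_ne hcv (Ne.symm h)
      rw [pvLeavesOf, if_neg h, List.filter_cons_of_neg (by simpa using h)]
      have : r.filter (fun v => pvF v == c) = [] := by
        rw [List.filter_eq_nil_iff]
        intro w hw
        have : pvF v ≤ pvF w := pvFd_mono (hhead w hw)
        simp only [beq_iff_eq]; omega
      simp [this]

-- the later groups are the filtered leaves of the later stems, on a sorted tail
lemma pvGroupsOf_eq (l : List Int) : ∀ (c : Int), l.Pairwise (· ≤ ·) →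
    (∀ v ∈ l, c ≤ pvF v) →
    pvGroupsOf l c = (pvStemsOf l c).map
      (fun s => (l.filter (fun v => pvF v == s)).map pvM) := by
  induction l with
  | nil => intro c _ _; simp [pvGroupsOf, pvStemsOf]
  | cons v r ih =>
    intro c hpw hge
    have hhead : ∀ w ∈ r, v ≤ w := fun w hw => (List.pairwise_cons.mp hpw).1 w hw
    have hcv : c ≤ pvF v := hge v (by simp)
    by_cases h : pvF v = c
    · have hge' : ∀ w ∈ r, c ≤ pvF w := fun w hw => le_trans hcv (pvFd_mono (hhead w hw))
      rw [pvGroupsOf, if_pos h, pvStemsOf, if_pos h, ih c hpw.tail hge']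
      apply List.map_congr_left
      intro s hs
      have hslt : c < s := ((pvMem_stemsOf r c s hpw.tail hge').mp hs).2
      rw [List.filter_cons_of_neg (by simp only [beq_iff_eq]; omega)]
    · have hclt : c < pvF v := lt_of_le_of_ne hcv (Ne.symm h)
      have hge' : ∀ w ∈ r, pvF v ≤ pvF w := fun w hw => pvFd_mono (hhead w hw)
      rw [pvGroupsOf, if_neg h, pvStemsOf, if_neg h, List.map_cons,
        List.filter_cons_of_pos (by simp), List.map_cons,
        ← pvLeavesOf_eq r (pvF v) hpw.tail hge', ih (pvF v) hpw.tail hge']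
      congr 1
      apply List.map_congr_left
      intro s hs
      have hslt : pvF v < s := ((pvMem_stemsOf r (pvF v) s hpw.tail hge').mp hs).2
      rw [List.filter_cons_of_neg (by simp only [beq_iff_eq]; omega)]

-- the filtered leaves of a sorted list are already sorted (same stem ⇒ leaf order = value order)
lemma pvFiltered_pairwise (l : List Int) (s : Int) (hpw : l.Pairwise (· ≤ ·)) :
    ((l.filter (fun v => pvF v == s)).map pvM).Pairwise (· ≤ ·) := by
  rw [List.pairwise_map]
  refine (hpw.filter _).imp_of_mem ?_
  intro a b ha hb hab
  have has : pvF a = s := by simpa using List.of_mem_filter ha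
  have hbs : pvF b = s := by simpa using List.of_mem_filter hb
  have h1 := pvFM a
  have h2 := pvFM b
  omega

-- ===== VERDICT (by name: the statement is the Claim_ definition above) =====
theorem calculate_stem_leaf_py_spec : Claim_equal_calculate_stem_leaf_py := by
  intro data _
  show calculate_stem_leaf_py data = calculate_stem_leaf_py_alt data
  unfold calculate_stem_leaf_py calculate_stem_leaf_py_alt
  have hperm : (PySem.List.sorted data (fun x => x) false).Perm data :=
    PySem.List.sorted_perm data (fun x => x) false
  have hpw : (PySem.List.sorted data (fun x => x) false).Pairwise (· ≤ ·) := by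
    simpa using PySem.List.sorted_pairwise data (fun x => x)
  cases hs : PySem.List.sorted data (fun x => x) false with
  | nil =>
    have hd : data = [] := by
      rw [hs] at hperm; exact hperm.symm.eq_nil
    subst hd
    rfl
  | cons v rest =>
    rw [hs] at hpw hperm
    have hge : ∀ w ∈ rest, pvF v ≤ pvF w :=
      fun w hw => pvFd_mono ((List.pairwise_cons.mp hpw).1 w hw)
    have hA : pvLoopA (v :: rest) [] [] none [] =
        pvLoopA rest [] [] (some (pvF v)) [pvM v] := by
      simp [pvLoopA, pvF, pvM]
    rw [hA, pvLoopA_eq]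
    -- name the stem list of A
    set S : List Int := pvF v :: pvStemsOf rest (pvF v) with hS
    have hSpw : S.Pairwise (· < ·) := pvStemsOf_pairwise rest (pvF v) hpw.tail hge
    have hSnodup : S.Nodup := hSpw.nodup
    -- A's stems = B's stems
    have hmemS : ∀ x, x ∈ S ↔ x ∈ PySem.Set.ofList (data.map pvF) := by
      intro x
      rw [PySem.Set.mem_ofList, hS]
      have hmapperm : ((v :: rest).map pvF).Perm (data.map pvF) := hperm.map pvF
      rw [← hmapperm.mem_iff]
      constructor
      · intro hx
        rcases (by simpa using hx : x = pvF v ∨ x ∈ pvStemsOf rest (pvF v)) with rfl | hx'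
        · simp
        · have := ((pvMem_stemsOf rest (pvF v) x hpw.tail hge).mp hx').1
          simp [this]
      · intro hx
        rcases (by simpa using hx : x = pvF v ∨ x ∈ rest.map pvF) with rfl | hx'
        · simp
        · obtain ⟨w, hw, rfl⟩ := List.mem_map.mp hx'
          rcases lt_or_eq_of_le (hge w hw) with hgt | heq
          · exact List.mem_cons_of_mem _
              ((pvMem_stemsOf rest (pvF v) _ hpw.tail hge).mpr ⟨hx', hgt⟩)
          · simp [← heq]
    have hSperm : S.Perm (PySem.Set.ofList (data.map pvF)) :=
      (List.perm_ext_iff_of_nodup hSnodup (PySem.Set.nodup_ofList _)).mpr hmemS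
    have hstems : PySem.List.sorted (PySem.Set.ofList (data.map pvF)) (fun x => x) false
        = S := by
      apply PySem.List.sorted_id_eq_of_perm_of_pairwise
      · exact hSperm
      · exact hSpw.imp le_of_lt
    -- A's leaf groups = B's per-stem sorted filters
    have hgroup : ∀ s : Int,
        PySem.List.sorted ((data.filter (fun w => pvF w == s)).map pvM) (fun x => x) false
          = ((v :: rest).filter (fun w => pvF w == s)).map pvM := by
      intro s
      apply PySem.List.sorted_id_eq_of_perm_of_pairwise
      · exact ((hperm.filter _).map pvM)
      · exact pvFiltered_pairwise (v :: rest) s hpw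
    have hleaves :
        ([pvM v] ++ pvLeavesOf rest (pvF v)) :: pvGroupsOf rest (pvF v)
          = S.map (fun s =>
              PySem.List.sorted
                ((data.filter (fun w => pvF w == s)).map pvM) (fun x => x) false) := by
      rw [hS, List.map_cons, hgroup, List.filter_cons_of_pos (by simp), List.map_cons,
        ← pvLeavesOf_eq rest (pvF v) hpw.tail hge,
        pvGroupsOf_eq rest (pvF v) hpw.tail hge]
      congr 1
      apply List.map_congr_left
      intro s hsmem
      have hslt : pvF v < s := ((pvMem_stemsOf rest (pvF v) s hpw.tail hge).mp hsmem).2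
      rw [hgroup s, List.filter_cons_of_neg (by simp only [beq_iff_eq]; omega)]
    simp only [List.nil_append]
    rw [hleaves]
    show (S, _) = _
    rw [← hstems]
    rfl
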